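-- pv_equiv track=rewrite | github.com/vitdoan/Tokenization | p1.py | handle_eed_eedly
-- ===== SOURCE A (Python) =====
-- def is_vowel(char):
--     vowels = ['a','e','o','u','y','i']
--     if char in vowels:
--         return True
--     return False
--
-- def handle_eed_eedly(word):
--     def replace_eed_eedly(i,word_to_replace,word):
--         cons_preceed = False
--         while i >= -len(word):
--             if is_vowel(word[i]):
--                 if cons_preceed:
--                     word = word.replace(word_to_replace,'ee')
--                     return word
--                 return word
--             else:
--                 cons_preceed = True
--             i -= 1
--         return word
--     if 'eedly' in word:
--         return replace_eed_eedly(-6,'eedly',word)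
--     if 'eed' in word:
--         return replace_eed_eedly(-6,'eed',word)
--     return word
-- ===== SOURCE B (Python) =====
-- def handle_eed_eedly(word):
--     for suffix in ('eedly', 'eed'):
--         if suffix in word:
--             end = len(word) - 5
--             j = max(word.rfind(v, 0, end) for v in 'aeouyi')
--             return word.replace(suffix, 'ee') if 0 <= j < end - 1 else word
--     return word
-- ===== Notes on version B (the rewrite author's own statement) =====
-- stated objective: alternative
-- what changed: Instead of A's stateful right-to-left scan with a cons_preceed flag, B computes the index of the rightmost vowel in word[:-5] via per-vowel str.rfind with an end bound plus max, and replaces the suffix iff that index exists and lies strictly left of position len-6.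
import Mathlib
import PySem

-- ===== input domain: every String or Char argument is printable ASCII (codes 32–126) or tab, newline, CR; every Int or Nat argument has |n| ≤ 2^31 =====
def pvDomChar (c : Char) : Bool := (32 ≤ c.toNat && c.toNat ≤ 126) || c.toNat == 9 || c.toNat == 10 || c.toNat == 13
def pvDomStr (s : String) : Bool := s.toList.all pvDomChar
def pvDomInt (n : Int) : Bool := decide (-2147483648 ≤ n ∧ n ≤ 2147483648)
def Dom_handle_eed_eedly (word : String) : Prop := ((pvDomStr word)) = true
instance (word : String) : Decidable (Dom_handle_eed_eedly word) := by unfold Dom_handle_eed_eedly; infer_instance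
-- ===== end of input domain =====

-- B replaces A's stateful right-to-left scan (cons_preceed flag, early returns) by computing
-- the rightmost vowel index in word[:-5] via per-vowel rfind + max and one comparison; objective: alternative.

-- ===== PORT A =====
def is_vowel (char : Char) : Bool :=
  let vowels : List Char := ['a', 'e', 'o', 'u', 'y', 'i']
  if vowels.contains char then true else false

-- the `while i >= -len(word)` loop of A's nested helper replace_eed_eedly, with fuel
-- for termination only (fuel = len(word) always suffices for the call at i = -6)
def replaceLoop (fuel : Nat) (i : Int) (cons_preceed : Bool)
    (word_to_replace : String) (word : String) : String :=
  match fuel with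
  | 0 => word
  | fuel + 1 =>
    if i ≥ -(PySem.Str.len word : Int) then
      match PySem.Str.pyGet? word i with
      | some c =>
        if is_vowel c then
          if cons_preceed then PySem.Str.replace word word_to_replace "ee" else word
        else replaceLoop fuel (i - 1) true word_to_replace word
      | none => word   -- unreachable: i is in range here
    else word

def handle_eed_eedly (word : String) : String :=
  if PySem.Str.isIn "eedly" word then
    replaceLoop (PySem.Str.len word).toNat (-6) false "eedly" word
  else if PySem.Str.isIn "eed" word then
    replaceLoop (PySem.Str.len word).toNat (-6) false "eed" word
  else word

-- ===== PORT B =====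
-- largest index i < n with l[i] = c, else -1
def rlast (l : List Char) (c : Char) : Nat → Int
  | 0 => -1
  | n + 1 => if l[n]? = some c then (n : Int) else rlast l c n

-- hand port of word.rfind(c, 0, e) for a single-character needle: exact — Python clamps a
-- negative end bound by adding len (floored at 0), a nonnegative one at len, then returns
-- the largest match index below it (or -1)
def rfind1 (l : List Char) (c : Char) (e : Int) : Int :=
  rlast l c (if e < 0 then (e + l.length).toNat else min e.toNat l.length)

-- the `for suffix in ('eedly','eed')` loop of B
def go_alt : List String → String → String
  | [], word => word
  | suf :: rest, word =>
    if PySem.Str.isIn suf word then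
      let e : Int := PySem.Str.len word - 5
      let j : Int := ['e', 'o', 'u', 'y', 'i'].foldl
          (fun m v => max m (rfind1 word.toList v e)) (rfind1 word.toList 'a' e)
      if 0 ≤ j ∧ j < e - 1 then PySem.Str.replace word suf "ee" else word
    else go_alt rest word

def handle_eed_eedly_alt (word : String) : String :=
  go_alt ["eedly", "eed"] word

-- ===== PRECONDITION & SPEC =====
def Spec_handle_eed_eedly (word : String) (out : String) : Prop := out = handle_eed_eedly_alt word
instance (word : String) (out : String) : Decidable (Spec_handle_eed_eedly word out) := by unfold Spec_handle_eed_eedly; infer_instance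

-- ===== CLAIM (what is proved, stated in full; the proofs are below) =====
def Claim_equal_handle_eed_eedly : Prop := ∀ (word : String), Dom_handle_eed_eedly word → Spec_handle_eed_eedly word (handle_eed_eedly word)

-- ===== LEMMAS AND PROOFS =====

-- the common characterisation both sides are reduced to
def condB (l : List Char) : Bool :=
  decide (6 ≤ l.length) && (l[l.length - 6]?.all fun c => !(is_vowel c))
    && (l.take (l.length - 6)).any is_vowel

theorem pyGet?_neg_formula (l : List Char) (i : Int) (h1 : -(l.length:Int) ≤ i) (h2 : i < 0) :
    PySem.List.pyGet? l i = l[(i + l.length).toNat]? := by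
  have : ¬ (0 ≤ i) := by omega
  simp [PySem.List.pyGet?, PySem.List.pyIdx?, this, h1]
  congr 1
  omega

-- with cons_preceed = true the remaining loop replaces iff a vowel occurs among
-- positions -len .. i, i.e. in the first (i + len + 1) characters
theorem loop_true (wtr word : String) (f : Nat) (i : Int) (hi : i < 0)
    (hf : (i + word.toList.length + 1).toNat ≤ f) :
    replaceLoop f i true wtr word =
      if (word.toList.take (i + word.toList.length + 1).toNat).any is_vowel then
        PySem.Str.replace word wtr "ee"
      else word := by
  induction f generalizing i with
  | zero =>
    have h0 : (i + word.toList.length + 1).toNat = 0 := Nat.le_zero.mp hf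
    simp only [replaceLoop, h0, List.take_zero, List.any_nil, Bool.false_eq_true, if_false]
  | succ f ih =>
    by_cases hge : i ≥ -(word.toList.length : Int)
    · set l := word.toList with hl
      have hlen : PySem.Str.len word = (l.length : Int) := by simp [hl]
      have hj : PySem.Str.pyGet? word i = l[(i + l.length).toNat]? := by
        rw [show PySem.Str.pyGet? word i = PySem.List.pyGet? l i by simp [hl]]
        exact pyGet?_neg_formula l i hge hi
      have hjlt : (i + l.length).toNat < l.length := by omega
      have hsome : l[(i + l.length).toNat]? = some l[(i + l.length).toNat] :=
        List.getElem?_eq_getElem hjlt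
      have htake : l.take ((i + l.length).toNat + 1) =
          l.take (i + l.length).toNat ++ [l[(i + l.length).toNat]] := by
        rw [List.take_add_one, hsome]; rfl
      have hnat : (i + l.length + 1).toNat = (i + l.length).toNat + 1 := by omega
      rw [replaceLoop]
      rw [if_pos (by rw [hlen]; exact hge)]
      rw [hj, hsome]
      by_cases hv : is_vowel l[(i + l.length).toNat]
      · simp only [hv, if_true, hnat, htake, List.any_append, List.any_cons, List.any_nil,
          Bool.or_true, Bool.or_false, if_true]
      · simp only [Bool.not_eq_true] at hv
        simp only [hv, Bool.false_eq_true, if_false]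
        rw [ih (i - 1) (by omega) (by omega)]
        have h2 : (i - 1 + (l.length:Int) + 1).toNat = (i + l.length).toNat := by omega
        have h3 : (l.take ((i + l.length).toNat + 1)).any is_vowel
            = (l.take (i + l.length).toNat).any is_vowel := by
          rw [htake]; simp only [List.any_append, List.any_cons, List.any_nil, hv, Bool.or_false]
        rw [h2, hnat, h3]
    · have h0 : (i + word.toList.length + 1).toNat = 0 := by
        simp only [not_le, ge_iff_le] at hge; omega
      rw [replaceLoop]
      rw [if_neg (by simpa using hge)]
      simp only [h0, List.take_zero, List.any_nil, Bool.false_eq_true, if_false]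

-- A's helper call replace_eed_eedly(-6, wtr, word) equals the common characterisation
theorem core_A (wtr word : String) :
    replaceLoop (PySem.Str.len word).toNat (-6) false wtr word =
      if condB word.toList then PySem.Str.replace word wtr "ee" else word := by
  set l := word.toList with hl
  have hlen : PySem.Str.len word = (l.length : Int) := by simp [hl]
  by_cases h6 : 6 ≤ l.length
  · -- long word
    have hfuel : (PySem.Str.len word).toNat = (l.length - 1) + 1 := by rw [hlen]; omega
    have hget : PySem.Str.pyGet? word (-6) = l[(((-6):Int) + l.length).toNat]? := by
      rw [show PySem.Str.pyGet? word (-6) = PySem.List.pyGet? l (-6) by simp [hl]]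
      exact pyGet?_neg_formula l (-6) (by omega) (by omega)
    have hidx : (((-6):Int) + l.length).toNat = l.length - 6 := by omega
    have hjlt : l.length - 6 < l.length := by omega
    have hsome : l[l.length - 6]? = some l[l.length - 6] :=
      List.getElem?_eq_getElem hjlt
    rw [hfuel, replaceLoop, if_pos (by rw [hlen]; omega), hget, hidx, hsome]
    by_cases hv : is_vowel l[l.length - 6]
    · -- vowel at word[-6]: A returns word immediately, condB's middle conjunct is false
      simp only [hv, if_true, Bool.false_eq_true, if_false]
      rw [if_neg]
      simp only [condB, hsome, Option.all_some, hv, Bool.not_true, Bool.and_false,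
        Bool.false_and, Bool.false_eq_true, not_false_eq_true]
    · simp only [Bool.not_eq_true] at hv
      simp only [hv, Bool.false_eq_true, if_false]
      rw [show ((-6:Int) - 1) = -7 from by norm_num]
      rw [loop_true wtr word (l.length - 1) (-7) (by omega) (by rw [← hl]; omega)]
      rw [← hl]
      have hn : (((-7):Int) + l.length + 1).toNat = l.length - 6 := by omega
      rw [hn]
      have hcond : condB l = (l.take (l.length - 6)).any is_vowel := by
        simp [condB, h6, hsome, hv]
      rw [hcond]
  · -- short word: the loop condition -6 ≥ -len fails at once; condB's length guard fails
    have hB : condB l = false := by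
      simp only [condB, Bool.and_eq_false_iff]
      left; left; simpa using h6
    rw [hB]
    simp only [Bool.false_eq_true, if_false]
    cases hfuel : (PySem.Str.len word).toNat with
    | zero => rfl
    | succ k =>
      rw [replaceLoop, if_neg]
      rw [hlen]; omega

-- ---- rlast / fold-max facts ----

theorem rlast_lt (l : List Char) (c : Char) (n : Nat) : rlast l c n < n := by
  induction n with
  | zero => simp [rlast]
  | succ n ih =>
    rw [rlast]
    split
    · omega
    · omega

theorem rlast_spec (l : List Char) (c : Char) (n : Nat) (h : 0 ≤ rlast l c n) :
    l[(rlast l c n).toNat]? = some c := by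
  induction n with
  | zero => simp [rlast] at h
  | succ n ih =>
    rw [rlast] at h ⊢
    by_cases hc : l[n]? = some c
    · rw [if_pos hc]; simpa using hc
    · rw [if_neg hc]; rw [if_neg hc] at h; exact ih h

theorem rlast_ge (l : List Char) (c : Char) (n : Nat) (i : Nat) (hi : i < n)
    (h : l[i]? = some c) : (i : Int) ≤ rlast l c n := by
  induction n with
  | zero => omega
  | succ n ih =>
    rw [rlast]
    split
    · next heq =>
      omega
    · next hne =>
      have : i ≠ n := by rintro rfl; exact hne h
      exact ih (by omega)

theorem foldl_max_init (f : Char → Int) (vs : List Char) (a : Int) :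
    a ≤ vs.foldl (fun m v => max m (f v)) a := by
  induction vs generalizing a with
  | nil => simp
  | cons v vs ih => exact le_trans (le_max_left a (f v)) (ih _)

theorem foldl_max_mem (f : Char → Int) (vs : List Char) (a : Int) (v : Char) (hv : v ∈ vs) :
    f v ≤ vs.foldl (fun m v => max m (f v)) a := by
  induction vs generalizing a with
  | nil => simp at hv
  | cons w ws ih =>
    rcases List.mem_cons.mp hv with rfl | hv'
    · exact le_trans (le_max_right a (f v)) (foldl_max_init f ws _)
    · exact ih _ hv'

theorem foldl_max_cases (f : Char → Int) (vs : List Char) (a : Int) :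
    vs.foldl (fun m v => max m (f v)) a = a ∨ ∃ v ∈ vs, vs.foldl (fun m v => max m (f v)) a = f v := by
  induction vs generalizing a with
  | nil => left; rfl
  | cons w ws ih =>
    rcases ih (max a (f w)) with h | ⟨v, hv, h⟩
    · simp only [List.foldl_cons] at *
      rcases max_cases a (f w) with ⟨he, _⟩ | ⟨he, _⟩
      · left; rw [h, he]
      · right; exact ⟨w, List.mem_cons_self, by rw [h, he]⟩
    · right; exact ⟨v, List.mem_cons_of_mem _ hv, h⟩

-- B's branch body equals the common characterisation
theorem core_B (suf word : String) :
    (let e : Int := PySem.Str.len word - 5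
     let j : Int := ['e', 'o', 'u', 'y', 'i'].foldl
         (fun m v => max m (rfind1 word.toList v e)) (rfind1 word.toList 'a' e)
     if 0 ≤ j ∧ j < e - 1 then PySem.Str.replace word suf "ee" else word) =
      (if condB word.toList then PySem.Str.replace word suf "ee" else word) := by
  set l := word.toList with hl
  have hlen : PySem.Str.len word = (l.length : Int) := by simp [hl]
  simp only []
  set e : Int := PySem.Str.len word - 5 with he
  set j : Int := ['e', 'o', 'u', 'y', 'i'].foldl
      (fun m v => max m (rfind1 l v e)) (rfind1 l 'a' e) with hjdef
  set N : Nat := if e < 0 then (e + l.length).toNat else min e.toNat l.length with hN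
  have he' : e = (l.length : Int) - 5 := by rw [he, hlen]
  have hrf : ∀ v, rfind1 l v e = rlast l v N := fun v => rfl
  have hvj : ∀ c, is_vowel c = true → rlast l c N ≤ j := by
    intro c hc
    have hc' : c ∈ (['a','e','o','u','y','i'] : List Char) := by
      revert hc; simp [is_vowel]
    simp only [List.mem_cons, List.not_mem_nil, or_false] at hc'
    have h1 := foldl_max_init (fun v => rfind1 l v e) ['e','o','u','y','i'] (rfind1 l 'a' e)
    have h2 := fun v hv => foldl_max_mem (fun v => rfind1 l v e) ['e','o','u','y','i']
      (rfind1 l 'a' e) v hv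
    rcases hc' with rfl | rfl | rfl | rfl | rfl | rfl
    · rw [← hrf]; exact h1
    all_goals rw [← hrf]; exact h2 _ (by simp)
  have hcases : ∃ v, is_vowel v = true ∧ j = rlast l v N := by
    rcases foldl_max_cases (fun v => rfind1 l v e) ['e','o','u','y','i'] (rfind1 l 'a' e)
      with h | ⟨v, hv, h⟩
    · exact ⟨'a', by decide, by rw [hjdef, h, hrf]⟩
    · refine ⟨v, ?_, by rw [hjdef, h, hrf]⟩
      simp only [List.mem_cons, List.not_mem_nil, or_false] at hv
      rcases hv with rfl | rfl | rfl | rfl | rfl <;> decide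
  have key : (0 ≤ j ∧ j < e - 1) ↔ condB l = true := by
    constructor
    · rintro ⟨h0, h1⟩
      obtain ⟨v, hv, hj⟩ := hcases
      have hjN : j < (N : Int) := by rw [hj]; exact rlast_lt l v N
      have hspec : l[j.toNat]? = some v := by
        rw [hj]; rw [hj] at h0; exact rlast_spec l v N h0
      have hjlen : j.toNat < l.length := (List.getElem?_eq_some_iff.mp hspec).1
      have h7 : 7 ≤ l.length := by omega
      have hNval : N = l.length - 5 := by
        rw [hN, he', if_neg (by omega)]; omega
      have hjsmall : j.toNat < l.length - 6 := by omega
      simp only [condB, Bool.and_eq_true, decide_eq_true_eq]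
      refine ⟨⟨by omega, ?_⟩, ?_⟩
      · -- the char at position len-6 is a consonant
        have hsome : l[l.length - 6]? = some l[l.length - 6] :=
          List.getElem?_eq_getElem (by omega)
        rw [hsome, Option.all_some]
        by_contra hcv
        have hcv' : is_vowel l[l.length - 6] = true := by simpa using hcv
        have := hvj _ hcv'
        have hge : ((l.length - 6 : Nat) : Int) ≤ rlast l (l[l.length - 6]) N :=
          rlast_ge l _ N (l.length - 6) (by omega) hsome
        omega
      · -- some vowel occurs in the first len-6 characters
        rw [List.any_eq_true]
        refine ⟨v, ?_, hv⟩
        have : (l.take (l.length - 6))[j.toNat]? = some v := by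
          rw [List.getElem?_take_of_lt hjsmall]; exact hspec
        exact List.mem_of_getElem? this
    · intro hc
      simp only [condB, Bool.and_eq_true, decide_eq_true_eq] at hc
      obtain ⟨⟨h6, hmid⟩, hany⟩ := hc
      rw [List.any_eq_true] at hany
      obtain ⟨v, hvm, hv⟩ := hany
      obtain ⟨i, hilt, hgi⟩ := List.getElem_of_mem hvm
      have hitake : i < l.length - 6 := by simpa using hilt
      have h7 : 7 ≤ l.length := by omega
      have hNval : N = l.length - 5 := by
        rw [hN, he', if_neg (by omega)]; omega
      have hli : l[i]? = some v := by
        rw [← List.getElem?_take_of_lt (l := l) (j := l.length - 6) hitake]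
        rw [List.getElem?_eq_getElem hilt, hgi]
      have hri : (i : Int) ≤ rlast l v N := rlast_ge l v N i (by omega) hli
      have h0 : 0 ≤ j := le_trans (le_trans (by omega) hri) (hvj v hv)
      refine ⟨h0, ?_⟩
      obtain ⟨w, hw, hjw⟩ := hcases
      have hjN : j < (N : Int) := by rw [hjw]; exact rlast_lt l w N
      by_contra hlt
      rw [not_lt] at hlt
      have hje : j = (l.length : Int) - 6 := by omega
      have hspec : l[j.toNat]? = some w := by
        rw [hjw]; rw [hjw] at h0; exact rlast_spec l w N h0
      have hjn : j.toNat = l.length - 6 := by omega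
      rw [hjn] at hspec
      rw [hspec, Option.all_some] at hmid
      simp only [Bool.not_eq_true'] at hmid
      rw [hmid] at hw
      exact absurd hw (by simp)
  by_cases hc : condB l = true
  · rw [if_pos hc, if_pos (key.mpr hc)]
  · rw [if_neg hc]
    rw [if_neg (fun h => hc (key.mp h))]

-- ===== VERDICT (by name: the statement is the Claim_ definition above) =====
theorem handle_eed_eedly_spec : Claim_equal_handle_eed_eedly := by
  intro word _
  unfold Spec_handle_eed_eedly handle_eed_eedly handle_eed_eedly_alt
  simp only [go_alt]
  by_cases h1 : PySem.Str.isIn "eedly" word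
  · rw [if_pos h1, if_pos h1, core_A, core_B]
  · rw [if_neg h1, if_neg h1]
    by_cases h2 : PySem.Str.isIn "eed" word
    · rw [if_pos h2, if_pos h2, core_A, core_B]
    · rw [if_neg h2, if_neg h2]
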